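-- pv_equiv track=rewrite | github.com/gwcbi/haphpipe | haphpipe/utils/blastalign.py | aligned_seqs_to_list
-- ===== SOURCE A (Python) =====
-- def aligned_seqs_to_list(s1, s2, pos1, pos2):
--     ''' Convert aligned sequence strings to list
--             s1 - aligned sequence 1
--             s2 - aligned sequence 2
--             pos1 - start position of sequence 1
--             pos2 - start position of sequence 2
--     '''
--     ret = []
--     cur1, cur2 = pos1, pos2
--     for b1, b2 in zip(s1, s2):
--         p1 = p2 = None
--         if b1 == '-':
--             p1 = -1
--         else:
--             p1 = cur1
--             cur1 += 1
--         if b2 == '-':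
--             p2 = -1
--         else:
--             p2 = cur2
--             cur2 += 1
--         ret.append((p1, b1, b2, p2))
--     return ret
-- ===== SOURCE B (Python) =====
-- def _positions(s, start):
--     """Positions for one aligned sequence: -1 for gaps, else a running counter from start."""
--     out = []
--     cur = start
--     for b in s:
--         if b == '-':
--             out.append(-1)
--         else:
--             out.append(cur)
--             cur += 1
--     return out
--
--
-- def aligned_seqs_to_list(s1, s2, pos1, pos2):
--     return list(zip(_positions(s1, pos1), s1, s2, _positions(s2, pos2)))
-- ===== Notes on version B (the rewrite author's own statement) =====
-- stated objective: alternative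
-- what changed: Replaces the single interleaved two-counter loop with a factored per-sequence positional pass (_positions) applied independently to each sequence, combined by a single zip; zip truncation to the shorter sequence matches A's zip(s1, s2).
import Mathlib
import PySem

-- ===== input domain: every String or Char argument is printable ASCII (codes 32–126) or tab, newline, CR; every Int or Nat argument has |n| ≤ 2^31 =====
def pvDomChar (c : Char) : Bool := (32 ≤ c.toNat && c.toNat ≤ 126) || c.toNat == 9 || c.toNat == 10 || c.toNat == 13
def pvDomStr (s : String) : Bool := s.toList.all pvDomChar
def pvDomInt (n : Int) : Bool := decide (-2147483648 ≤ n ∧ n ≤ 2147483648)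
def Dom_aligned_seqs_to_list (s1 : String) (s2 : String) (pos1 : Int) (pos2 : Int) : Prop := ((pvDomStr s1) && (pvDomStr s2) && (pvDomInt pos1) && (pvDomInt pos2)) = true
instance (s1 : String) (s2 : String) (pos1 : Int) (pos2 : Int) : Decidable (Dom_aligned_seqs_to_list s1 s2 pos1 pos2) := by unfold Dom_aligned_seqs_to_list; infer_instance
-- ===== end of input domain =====

-- B factors A's single interleaved two-counter loop into one per-sequence positional pass applied
-- to each sequence independently, combined by a zip (alternative decomposition, same cost).

-- ===== PORT A =====
-- the for-loop over zip(s1, s2) with state (ret, cur1, cur2); branches in source order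
def pvLoopA : List (Char × Char) → Int → Int →
    List (Int × String × String × Int) → List (Int × String × String × Int)
  | [], _, _, ret => ret
  | (b1, b2) :: rest, cur1, cur2, ret =>
    let pc1 : Int × Int := if b1 = '-' then (-1, cur1) else (cur1, cur1 + 1)
    let pc2 : Int × Int := if b2 = '-' then (-1, cur2) else (cur2, cur2 + 1)
    pvLoopA rest pc1.2 pc2.2 (ret ++ [(pc1.1, String.singleton b1, String.singleton b2, pc2.1)])

def aligned_seqs_to_list (s1 : String) (s2 : String) (pos1 : Int) (pos2 : Int) :
    List (Int × String × String × Int) :=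
  pvLoopA (s1.toList.zip s2.toList) pos1 pos2 []

-- ===== PORT B =====
-- _positions: running counter from start, -1 for each gap
def pvPositions : List Char → Int → List Int
  | [], _ => []
  | c :: cs, cur => if c = '-' then -1 :: pvPositions cs cur else cur :: pvPositions cs (cur + 1)

-- list(zip(4 sequences)): truncates to the shortest
def pvZip4 : List Int → List Char → List Char → List Int → List (Int × String × String × Int)
  | p1 :: ps1, b1 :: bs1, b2 :: bs2, p2 :: ps2 =>
    (p1, String.singleton b1, String.singleton b2, p2) :: pvZip4 ps1 bs1 bs2 ps2
  | _, _, _, _ => []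

def aligned_seqs_to_list_alt (s1 : String) (s2 : String) (pos1 : Int) (pos2 : Int) :
    List (Int × String × String × Int) :=
  pvZip4 (pvPositions s1.toList pos1) s1.toList s2.toList (pvPositions s2.toList pos2)

-- ===== PRECONDITION & SPEC =====
def Spec_aligned_seqs_to_list (s1 : String) (s2 : String) (pos1 : Int) (pos2 : Int) (out : List (Int × String × String × Int)) : Prop := out = aligned_seqs_to_list_alt s1 s2 pos1 pos2
instance (s1 : String) (s2 : String) (pos1 : Int) (pos2 : Int) (out : List (Int × String × String × Int)) : Decidable (Spec_aligned_seqs_to_list s1 s2 pos1 pos2 out) := by unfold Spec_aligned_seqs_to_list; infer_instance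

-- ===== CLAIM (what is proved, stated in full; the proofs are below) =====
def Claim_equal_aligned_seqs_to_list : Prop := ∀ (s1 : String) (s2 : String) (pos1 : Int) (pos2 : Int), Dom_aligned_seqs_to_list s1 s2 pos1 pos2 → Spec_aligned_seqs_to_list s1 s2 pos1 pos2 (aligned_seqs_to_list s1 s2 pos1 pos2)

-- ===== LEMMAS AND PROOFS =====

-- the loop of A, on any char lists and counters, produces acc ++ the zip of B's positional passes
theorem pvLoopA_eq (l1 : List Char) :
    ∀ (l2 : List Char) (c1 c2 : Int) (acc : List (Int × String × String × Int)),
      pvLoopA (l1.zip l2) c1 c2 acc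
        = acc ++ pvZip4 (pvPositions l1 c1) l1 l2 (pvPositions l2 c2) := by
  induction l1 with
  | nil => intro l2 c1 c2 acc; simp [pvLoopA, pvZip4]
  | cons b1 t1 ih =>
    intro l2 c1 c2 acc
    cases l2 with
    | nil => simp [pvLoopA, pvPositions, pvZip4]
    | cons b2 t2 =>
      by_cases h1 : b1 = '-' <;> by_cases h2 : b2 = '-' <;>
        simp [pvLoopA, pvPositions, pvZip4, h1, h2, ih]

-- ===== VERDICT (by name: the statement is the Claim_ definition above) =====
theorem aligned_seqs_to_list_spec : Claim_equal_aligned_seqs_to_list := by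
  intro s1 s2 pos1 pos2 _
  unfold Spec_aligned_seqs_to_list aligned_seqs_to_list aligned_seqs_to_list_alt
  simpa using pvLoopA_eq s1.toList s2.toList pos1 pos2 []
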